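-- pv_equiv track=rewrite | github.com/bjarkemoensted/adventofcode | aoc/2023/solution22.py | make_restmap
-- ===== SOURCE A (Python) =====
-- _down = (0, 0, -1)
--
-- def collision(cube1, cube2):
--     """Returns true if the two cubes collide with each other."""
--     dim = len(cube1[0])
--
--     # Assume collision. Switch to False if any coordinate (x, y, z) is disjunct between the two cubes
--     res = True
--     for i in range(dim):
--         low1 = cube1[0][i]
--         high1 = cube1[1][i]
--         low2 = cube2[0][i]
--         high2 = cube2[1][i]
--         disjunct = low2 > high1 or high2 < low1
--         if disjunct:
--             return False
--         #
--     return res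
--
-- def _shift_coords(cube, dir_):
--     res = tuple(tuple(a + b for a, b in zip(corner, dir_)) for corner in cube)
--     return res
--
-- def make_restmap(cubes):
--     """Maps all cubes (index) to the indices of the cubes on which they rest.
--     For example, {1: [2,3,4], ...} indicates that cube 1 rests on cubes 2, 3, and 4.
--     Works by trying to shift all cubes downwards one step, then identifying with which cubes it collides."""
--
--     res = {}
--     for i, cube in enumerate(cubes):
--         res[i] = []
--         newcube = _shift_coords(cube, dir_=_down)
--         for j, othercube in enumerate(cubes):
--             if i == j:
--                 continue
--             if collision(newcube, othercube):
--                 res[i] += [j]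
--             #
--         #
--     return res
-- ===== SOURCE B (Python) =====
-- def _touches(c, d):
--     """Box c, moved one step down, overlaps box d in every axis c's first corner
--     carries (the shift caps that at 3); same early exit on the first disjoint axis."""
--     for k in range(min(len(c[0]), 3)):
--         drop = 1 if k == 2 else 0
--         if d[0][k] > c[1][k] - drop or d[1][k] < c[0][k] - drop:
--             return False
--     return True
--
--
-- def make_restmap(cubes):
--     """Maps all cubes (index) to the indices of the cubes on which they rest.
--     Sweep-and-prune on the x axis: indices sorted by low x; each index scans only
--     later indices while their low x still reaches its high x (any resting contact
--     overlaps in x, so no pair is missed); each row is sorted back to index order."""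
--     n = len(cubes)
--     order = sorted(range(n), key=lambda i: cubes[i][0][0])
--     rows = [[] for _ in range(n)]
--     rest = order
--     while rest:
--         a, rest = rest[0], rest[1:]
--         hi = cubes[a][1][0]
--         for b in rest:
--             if cubes[b][0][0] > hi:
--                 break
--             if _touches(cubes[a], cubes[b]):
--                 rows[a].append(b)
--             if _touches(cubes[b], cubes[a]):
--                 rows[b].append(a)
--     return {i: sorted(row) for i, row in enumerate(rows)}
-- ===== Notes on version B (the rewrite author's own statement) =====
-- stated objective: alternative
-- what changed: A tests every ordered pair against a freshly shifted copy of each cube; B is a sweep-and-prune: it sorts the indices by low x, scans from each index only forward while the next low x still reaches its high x (any resting contact overlaps in x, so no pair is missed), runs the two directed per-axis tests with the downward shift folded in, and sorts each row back to index order at the end; …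
-- outside the precondition, e.g. on make_restmap([((), (3,)), ((),)]): A returns {0: [1], 1: [0]}, B raises IndexError; on make_restmap([((1, 2),)]): A returns {0: []}, B raises IndexError
import Mathlib
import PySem

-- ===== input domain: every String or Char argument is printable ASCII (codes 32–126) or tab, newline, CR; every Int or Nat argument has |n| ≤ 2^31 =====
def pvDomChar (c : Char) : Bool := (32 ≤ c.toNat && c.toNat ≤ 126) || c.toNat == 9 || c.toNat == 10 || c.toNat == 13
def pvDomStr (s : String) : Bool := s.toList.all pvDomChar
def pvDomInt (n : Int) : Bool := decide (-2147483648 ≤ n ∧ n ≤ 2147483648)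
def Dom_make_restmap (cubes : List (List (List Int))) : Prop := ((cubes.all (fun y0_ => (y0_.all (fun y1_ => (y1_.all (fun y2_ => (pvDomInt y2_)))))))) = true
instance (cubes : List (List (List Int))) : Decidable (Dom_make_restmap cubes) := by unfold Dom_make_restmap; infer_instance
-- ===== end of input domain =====

-- B replaces A's all-ordered-pairs scan by a sweep-and-prune on the x axis: indices sorted by
-- low x, each index scans only forward while the next low x still reaches its high x (every
-- contact overlaps in x), and each row is sorted back to index order at the end.

-- ===== PORT A =====
-- _shift_coords(cube, dir_): zip truncates like List.zipWith
def pvShiftCoords (cube : List (List Int)) (dir : List Int) : List (List Int) :=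
  cube.map (fun corner => List.zipWith (fun a b => a + b) corner dir)

-- the 'for i in range(dim)' loop of collision, with its early 'return False';
-- list indexing is pyGetD (default never read inside Pre_)
def pvCollisionLoop (c1 c2 : List (List Int)) : List Int → Bool
  | [] => true
  | i :: rest =>
    let low1 := PySem.List.pyGetD (PySem.List.pyGetD c1 0 []) i 0
    let high1 := PySem.List.pyGetD (PySem.List.pyGetD c1 1 []) i 0
    let low2 := PySem.List.pyGetD (PySem.List.pyGetD c2 0 []) i 0
    let high2 := PySem.List.pyGetD (PySem.List.pyGetD c2 1 []) i 0
    if low2 > high1 || high2 < low1 then false else pvCollisionLoop c1 c2 rest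

def pvCollision (c1 c2 : List (List Int)) : Bool :=
  pvCollisionLoop c1 c2 (PySem.List.pyRange 0 ((PySem.List.pyGetD c1 0 []).length : Int) 1)

def make_restmap (cubes : List (List (List Int))) : List (Int × List Int) :=
  ((PySem.List.enumerate cubes).foldl (fun res p =>
      let res := res.insert p.1 ([] : List Int)
      let newcube := pvShiftCoords p.2 [0, 0, -1]
      (PySem.List.enumerate cubes).foldl (fun res q =>
        if p.1 == q.1 then res
        else if pvCollision newcube q.2 then res.insert p.1 (res.getD p.1 [] ++ [q.1])
        else res) res)
    PySem.Dict.empty).items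

-- ===== PORT B =====
-- _touches(c, d): per-axis interval test with the downward shift folded in (drop = 1 on z);
-- early 'return False' on the first disjoint axis, indexing via pyGetD as in A's port
def pvTouchLoop (c d : List (List Int)) : List Int → Bool
  | [] => true
  | k :: rest =>
    let drop : Int := if k == 2 then 1 else 0
    if PySem.List.pyGetD (PySem.List.pyGetD d 0 []) k 0 > PySem.List.pyGetD (PySem.List.pyGetD c 1 []) k 0 - drop ||
       PySem.List.pyGetD (PySem.List.pyGetD d 1 []) k 0 < PySem.List.pyGetD (PySem.List.pyGetD c 0 []) k 0 - drop
    then false else pvTouchLoop c d rest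

def pvTouch (c d : List (List Int)) : Bool :=
  pvTouchLoop c d (PySem.List.pyRange 0 (min ((PySem.List.pyGetD c 0 []).length : Int) 3) 1)

-- cubes[i][0][0] and cubes[i][1][0]: the sort key (low x) and the scan bound (high x);
-- indices out of range(n) are nonnegative, so they are carried as Nat
def pvKey (cubes : List (List (List Int))) (i : Nat) : Int :=
  PySem.List.pyGetD (PySem.List.pyGetD (cubes.getD i []) 0 []) 0 0
def pvHiX (cubes : List (List (List Int))) (i : Nat) : Int :=
  PySem.List.pyGetD (PySem.List.pyGetD (cubes.getD i []) 1 []) 0 0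

-- the inner 'for b in rest: if cubes[b][0][0] > hi: break; …' loop
def pvScan (cubes : List (List (List Int))) (a : Nat) (hi : Int) : List Nat → List (List Int) → List (List Int)
  | [], rows => rows
  | b :: bs, rows =>
    if pvKey cubes b > hi then rows
    else
      let rows1 := if pvTouch (cubes.getD a []) (cubes.getD b []) then rows.set a (rows.getD a [] ++ [(b : Int)]) else rows
      let rows2 := if pvTouch (cubes.getD b []) (cubes.getD a []) then rows1.set b (rows1.getD b [] ++ [(a : Int)]) else rows1
      pvScan cubes a hi bs rows2

-- the outer 'while rest: a, rest = rest[0], rest[1:] …' loop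
def pvSweep (cubes : List (List (List Int))) : List Nat → List (List Int) → List (List Int)
  | [], rows => rows
  | a :: rest, rows => pvSweep cubes rest (pvScan cubes a (pvHiX cubes a) rest rows)

def make_restmap_alt (cubes : List (List (List Int))) : List (Int × List Int) :=
  let n := cubes.length
  let order := PySem.List.sorted (List.range n) (fun i => pvKey cubes i) false
  let rows0 : List (List Int) := (List.range n).map (fun _ => ([] : List Int))
  let rows := pvSweep cubes order rows0
  -- '{i: sorted(row) for i, row in enumerate(rows)}'
  (PySem.Dict.ofList ((PySem.List.enumerate rows).map
      (fun p => (p.1, PySem.List.sorted p.2 (fun x => x) false)))).items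

-- ===== PRECONDITION & SPEC =====
-- the number of coordinates collision's loop may safely read for the ordered pair (i, j)
def pvS (cubes : List (List (List Int))) (i j : Nat) : Nat :=
  min (min ((cubes.getD i []).getD 1 []).length 3)
      (min ((cubes.getD j []).getD 0 []).length ((cubes.getD j []).getD 1 []).length)

-- Pre_ = the inputs on which A returns normally (second clause: collision's loop stays in
-- range or exits on a disjoint axis first), RESTRICTED to lists whose cubes all have two
-- corners each carrying an x coordinate: on the excluded shapes A still returns a value (a
-- cube with no first-corner coordinates overlaps everything vacuously) while B's x-sweep has
-- no key to sort or prune by and raises, so those shapes are left out.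
def Pre_make_restmap (cubes : List (List (List Int))) : Prop :=
  (∀ c ∈ cubes, 2 ≤ c.length ∧ c.getD 0 [] ≠ [] ∧ c.getD 1 [] ≠ []) ∧
  ∀ i < cubes.length, ∀ j < cubes.length, i ≠ j →
    (min ((cubes.getD i []).getD 0 []).length 3 ≤ pvS cubes i j ∨
     ∃ k < min (min ((cubes.getD i []).getD 0 []).length 3) (pvS cubes i j),
       ((cubes.getD j []).getD 0 []).getD k 0 >
           ((cubes.getD i []).getD 1 []).getD k 0 - (if k = 2 then 1 else 0) ∨
       ((cubes.getD j []).getD 1 []).getD k 0 <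
           ((cubes.getD i []).getD 0 []).getD k 0 - (if k = 2 then 1 else 0))
instance (cubes : List (List (List Int))) : Decidable (Pre_make_restmap cubes) := by
  unfold Pre_make_restmap; infer_instance
def pvWitness_make_restmap : List (List (List Int)) :=
  [[[0, 0, 1], [0, 0, 1]], [[0, 0, 0], [0, 0, 0]]]

def Spec_make_restmap (cubes : List (List (List Int))) (out : List (Int × List Int)) : Prop := out = make_restmap_alt cubes
instance (cubes : List (List (List Int))) (out : List (Int × List Int)) : Decidable (Spec_make_restmap cubes out) := by unfold Spec_make_restmap; infer_instance

-- ===== CLAIM (what is proved, stated in full; the proofs are below) =====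
def Claim_equal_make_restmap : Prop := ∀ (cubes : List (List (List Int))), Dom_make_restmap cubes → Pre_make_restmap cubes → Spec_make_restmap cubes (make_restmap cubes)

-- ===== LEMMAS AND PROOFS =====

-- the directed pair predicate A computes: "cube i, moved down, collides with cube j"
def pvP (cubes : List (List (List Int))) (i j : Nat) : Bool :=
  pvCollision (pvShiftCoords (cubes.getD i []) [0, 0, -1]) (cubes.getD j [])

def pvPartner (cubes : List (List (List Int))) (i : Nat) : Nat → Bool :=
  fun j => decide (j ≠ i) && pvP cubes i j

-- row i of the result: the partners of i in index order
def pvRow (cubes : List (List (List Int))) (i : Nat) : List Int :=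
  ((List.range cubes.length).filter (pvPartner cubes i)).map (fun j => ((j : Nat) : Int))

-- B's directed pair test and its partner predicate
def pvT (cubes : List (List (List Int))) (i j : Nat) : Bool :=
  pvTouch (cubes.getD i []) (cubes.getD j [])
def pvPartnerT (cubes : List (List (List Int))) (i : Nat) : Nat → Bool :=
  fun j => decide (j ≠ i) && pvT cubes i j

-- the body of B's inner loop as a fold step
def pvUpd (cubes : List (List (List Int))) (a : Nat) (rows : List (List Int)) (b : Nat) : List (List Int) :=
  let rows1 := if pvT cubes a b then rows.set a (rows.getD a [] ++ [(b : Int)]) else rows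
  if pvT cubes b a then rows1.set b (rows1.getD b [] ++ [(a : Int)]) else rows1

-- B's row array after sweeping `done` (a prefix of `order`)
def pvRowsInv (cubes : List (List (List Int))) (order done : List Nat) : List (List Int) :=
  (List.range cubes.length).map (fun i =>
    ((if i ∈ done then order else done).filter (pvPartnerT cubes i)).map (fun j => ((j : Nat) : Int)))

lemma pv_getD_map_of_lt {α β : Type} (f : α → β) (l : List α) (b : Nat) (hb : b < l.length)
    (d : β) (d' : α) : (l.map f).getD b d = f (l.getD b d') := by
  simp [List.getD_eq_getElem?_getD, hb]

lemma pvA_inner (nc : List (List Int)) (i : Int)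
    (L : List (Int × List (List Int))) (d : PySem.Dict Int (List Int)) (v : List Int) :
    L.foldl (fun res q =>
        if i == q.1 then res
        else if pvCollision nc q.2 then res.insert i (res.getD i [] ++ [q.1])
        else res) (d.insert i v)
      = d.insert i (v ++ (L.filter (fun q => !(i == q.1) && pvCollision nc q.2)).map (·.1)) := by
  induction L generalizing v with
  | nil => simp
  | cons q L ih =>
    simp only [List.foldl_cons, List.filter_cons]
    cases hb : (i == q.1) with
    | true =>
      simp only [Bool.not_true, Bool.false_and, Bool.false_eq_true, if_false, if_true]
      exact ih v
    | false =>
      simp only [Bool.not_false, Bool.true_and, Bool.false_eq_true, if_false]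
      cases hc : pvCollision nc q.2 with
      | false => simp only [Bool.false_eq_true, if_false]; exact ih v
      | true =>
        simp only [if_true, PySem.Dict.getD_insert_self, PySem.Dict.insert_insert_self]
        rw [ih (v ++ [q.1])]
        simp

lemma pvA_eq (cubes : List (List (List Int))) :
    make_restmap cubes
      = (List.range cubes.length).map (fun i => ((i : Int), pvRow cubes i) : Nat → Int × List Int) := by
  unfold make_restmap
  rw [PySem.List.foldl_congr_mem _ _
    (fun (d : PySem.Dict Int (List Int)) (p : Int × List (List Int)) =>
      d.insert p.1 (((PySem.List.enumerate cubes).filter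
        (fun q => !(p.1 == q.1) && pvCollision (pvShiftCoords p.2 [0, 0, -1]) q.2)).map (·.1)))
    _ (fun acc p _ => by simpa using pvA_inner (pvShiftCoords p.2 [0, 0, -1]) p.1 (PySem.List.enumerate cubes) acc [])]
  rw [PySem.Dict.items_foldl_insert_fresh (PySem.List.enumerate cubes) (fun p => p.1)
      (fun p => ((PySem.List.enumerate cubes).filter
        (fun q => !(p.1 == q.1) && pvCollision (pvShiftCoords p.2 [0, 0, -1]) q.2)).map (·.1)) _
      (by intro a _; exact PySem.Dict.contains_empty _)
      (by rw [PySem.List.map_fst_enumerate]; exact PySem.List.nodup_pyRange_one _ _)]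
  rw [show (PySem.Dict.empty : PySem.Dict Int (List Int)).items = [] from rfl, List.nil_append]
  rw [PySem.List.enumerate_eq_map_pyRange cubes []]
  rw [show PySem.List.len cubes = ((cubes.length : Int)) from rfl]
  rw [PySem.List.pyRange_zero_natCast]
  simp only [List.map_map]
  apply List.map_congr_left
  intro i hi
  simp only [Function.comp]
  simp only [Prod.mk.injEq, true_and]
  rw [List.filter_map, List.map_map]
  unfold pvRow
  rw [List.filter_congr (q := pvPartner cubes i) ?_]
  · apply List.map_congr_left; intro a _; rfl
  · intro k hk
    simp only [Function.comp, PySem.List.pyGetD_natCast]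
    by_cases hki : k = i
    · subst hki; simp [pvPartner]
    · show (!((i : Int) == (k : Int)) && pvCollision _ _) = pvPartner cubes i k
      have : ((i : Int) == (k : Int)) = false := by
        simp [Ne.symm hki]
      rw [this]
      simp [pvPartner, pvP, hki]

-- scan = fold over the takeWhile prefix (the break)
lemma pvScan_eq_foldl (cubes : List (List (List Int))) (a : Nat) (hi : Int)
    (bs : List Nat) (rows : List (List Int)) :
    pvScan cubes a hi bs rows
      = (bs.takeWhile (fun b => decide (pvKey cubes b ≤ hi))).foldl (pvUpd cubes a) rows := by
  induction bs generalizing rows with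
  | nil => rfl
  | cons b bs ih =>
    rw [pvScan]
    by_cases h : pvKey cubes b ≤ hi
    · rw [if_neg (show ¬ pvKey cubes b > hi from by omega),
          List.takeWhile_cons_of_pos (by simpa using h), List.foldl_cons]
      exact ih _
    · rw [if_pos (show pvKey cubes b > hi from by omega),
          List.takeWhile_cons_of_neg (by simpa using h)]
      rfl

-- on a key-nondecreasing list, the break prefix is the whole filtered list
lemma pv_takeWhile_eq_filter (cubes : List (List (List Int))) (hi : Int) (bs : List Nat)
    (h : bs.Pairwise (fun x y => pvKey cubes x ≤ pvKey cubes y)) :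
    bs.takeWhile (fun b => decide (pvKey cubes b ≤ hi))
      = bs.filter (fun b => decide (pvKey cubes b ≤ hi)) := by
  induction bs with
  | nil => rfl
  | cons b bs ih =>
    rw [List.pairwise_cons] at h
    rw [List.takeWhile_cons, List.filter_cons]
    by_cases hb : pvKey cubes b ≤ hi
    · rw [if_pos (by simpa using hb), if_pos (by simpa using hb), ih h.2]
    · rw [if_neg (by simpa using hb), if_neg (by simpa using hb)]
      symm
      rw [List.filter_eq_nil_iff]
      intro x hx
      have := h.1 x hx
      simp only [decide_eq_true_eq]
      omega

lemma pv_length_upd (cubes : List (List (List Int))) (a b : Nat) (rows : List (List Int)) :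
    (pvUpd cubes a rows b).length = rows.length := by
  unfold pvUpd
  split_ifs <;> simp

lemma pv_length_foldl_upd (cubes : List (List (List Int))) (a : Nat) (cs : List Nat)
    (rows : List (List Int)) : (cs.foldl (pvUpd cubes a) rows).length = rows.length := by
  induction cs generalizing rows with
  | nil => rfl
  | cons c cs ih => rw [List.foldl_cons, ih, pv_length_upd]

lemma pv_getD_set_ne {l : List (List Int)} {j i : Nat} (v : List Int) (h : i ≠ j) :
    (l.set j v).getD i [] = l.getD i [] := by
  simp [List.getD_eq_getElem?_getD, List.getElem?_set_ne (Ne.symm h)]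

lemma pv_getD_set_self {l : List (List Int)} {j : Nat} (v : List Int) (h : j < l.length) :
    (l.set j v).getD j [] = v := by
  simp [List.getD_eq_getElem?_getD, h]

-- what one scan from `a` over candidates `cs` does to each row
lemma pv_foldl_upd_getD (cubes : List (List (List Int))) (a : Nat) (cs : List Nat)
    (rows : List (List Int)) (hnd : cs.Nodup) (ha : a ∉ cs) (hal : a < rows.length)
    (hcl : ∀ b ∈ cs, b < rows.length) (i : Nat) :
    (cs.foldl (pvUpd cubes a) rows).getD i []
      = if i = a then rows.getD a [] ++ (cs.filter (fun b => pvT cubes a b)).map (fun b => ((b : Nat) : Int))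
        else if i ∈ cs ∧ pvT cubes i a = true then rows.getD i [] ++ [(a : Int)]
        else rows.getD i [] := by
  induction cs generalizing rows with
  | nil =>
    simp only [List.foldl_nil, List.filter_nil, List.map_nil, List.append_nil,
      List.not_mem_nil, false_and, if_false]
    by_cases hia : i = a
    · subst hia; rw [if_pos rfl]
    · rw [if_neg hia]
  | cons c cs ih =>
    have hca : c ≠ a := fun h => ha (h ▸ List.mem_cons_self)
    have hc : c < rows.length := hcl c List.mem_cons_self
    have hnd' := (List.nodup_cons.mp hnd).2
    have hcc := (List.nodup_cons.mp hnd).1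
    have ha' : a ∉ cs := fun h => ha (List.mem_cons_of_mem _ h)
    rw [List.foldl_cons]
    have hlen : (pvUpd cubes a rows c).length = rows.length := pv_length_upd _ _ _ _
    rw [ih (pvUpd cubes a rows c) hnd' ha' (hlen ▸ hal) (fun b hb => hlen ▸ hcl b (List.mem_cons_of_mem _ hb))]
    have hupd_a : (pvUpd cubes a rows c).getD a []
        = rows.getD a [] ++ (if pvT cubes a c then [(c : Int)] else []) := by
      unfold pvUpd
      by_cases h1 : pvT cubes a c = true
      · by_cases h2 : pvT cubes c a = true
        · rw [if_pos h1, if_pos h2, pv_getD_set_ne _ (Ne.symm hca), pv_getD_set_self _ (by simpa using hal), if_pos h1]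
        · rw [if_pos h1, if_neg h2, pv_getD_set_self _ (by simpa using hal), if_pos h1]
      · by_cases h2 : pvT cubes c a = true
        · rw [if_neg h1, if_pos h2, pv_getD_set_ne _ (Ne.symm hca), if_neg h1, List.append_nil]
        · rw [if_neg h1, if_neg h2, if_neg h1, List.append_nil]
    have hupd_c : (pvUpd cubes a rows c).getD c []
        = rows.getD c [] ++ (if pvT cubes c a then [(a : Int)] else []) := by
      unfold pvUpd
      by_cases h1 : pvT cubes a c = true
      · by_cases h2 : pvT cubes c a = true
        · rw [if_pos h1, if_pos h2, pv_getD_set_self _ (by simpa using hc), pv_getD_set_ne _ hca, if_pos h2]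
        · rw [if_pos h1, if_neg h2, pv_getD_set_ne _ hca, if_neg h2, List.append_nil]
      · by_cases h2 : pvT cubes c a = true
        · rw [if_neg h1, if_pos h2, pv_getD_set_self _ (by simpa using hc), if_pos h2]
        · rw [if_neg h1, if_neg h2, if_neg h2, List.append_nil]
    have hupd_other : ∀ j, j ≠ a → j ≠ c → (pvUpd cubes a rows c).getD j [] = rows.getD j [] := by
      intro j hja hjc
      unfold pvUpd
      split_ifs <;>
        simp only [pv_getD_set_ne _ hja, pv_getD_set_ne _ hjc]
    by_cases hia : i = a
    · subst hia
      rw [if_pos rfl, if_pos rfl, hupd_a, List.filter_cons]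
      by_cases h1 : pvT cubes i c = true
      · simp only [if_pos h1, List.map_cons, List.append_assoc, List.singleton_append]
      · simp only [if_neg h1, List.append_nil]
    · rw [if_neg hia, if_neg hia]
      by_cases hic : i = c
      · subst hic
        have hnotin : ¬ (i ∈ cs ∧ pvT cubes i a = true) := fun h => hcc h.1
        rw [if_neg hnotin, hupd_c]
        by_cases h2 : pvT cubes i a = true
        · have hmemc : i ∈ i :: cs ∧ pvT cubes i a = true := ⟨List.mem_cons_self .., h2⟩
          rw [if_pos hmemc, if_pos h2]
        · have hno : ¬ (i ∈ i :: cs ∧ pvT cubes i a = true) := by rintro ⟨_, h⟩; exact h2 h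
          rw [if_neg hno, if_neg h2, List.append_nil]
      · rw [hupd_other i hia hic]
        by_cases hm : i ∈ cs ∧ pvT cubes i a = true
        · have hmemc : i ∈ c :: cs ∧ pvT cubes i a = true := ⟨List.mem_cons_of_mem _ hm.1, hm.2⟩
          rw [if_pos hm, if_pos hmemc]
        · have hno : ¬ (i ∈ c :: cs ∧ pvT cubes i a = true) := by
            rintro ⟨h1, h2⟩; exact hm ⟨(List.mem_cons.mp h1).resolve_left hic, h2⟩
          rw [if_neg hm, if_neg hno]

-- the sweep invariant: after processing `done`, row i holds exactly the partners whose pair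
-- has already been visited, in visit order
lemma pv_sweep_inv (cubes : List (List (List Int))) (order : List Nat)
    (hperm : order.Perm (List.range cubes.length))
    (hpw : order.Pairwise (fun x y => pvKey cubes x ≤ pvKey cubes y))
    (Himp : ∀ x y : Nat, x < cubes.length → y < cubes.length → pvT cubes x y = true →
      pvKey cubes y ≤ pvHiX cubes x ∧ pvKey cubes x ≤ pvHiX cubes y) :
    ∀ todo done : List Nat, done ++ todo = order →
      pvSweep cubes todo (pvRowsInv cubes order done) = pvRowsInv cubes order order := by
  have hnd : order.Nodup := hperm.nodup_iff.mpr (List.nodup_range)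
  have hmem : ∀ x, x ∈ order ↔ x < cubes.length := by
    intro x
    rw [hperm.mem_iff, List.mem_range]
  intro todo
  induction todo with
  | nil =>
    intro done hdone
    rw [List.append_nil] at hdone
    subst hdone
    rfl
  | cons a rest ih =>
    intro done hdone
    show pvSweep cubes rest (pvScan cubes a (pvHiX cubes a) rest (pvRowsInv cubes order done)) = _
    have hstep : pvScan cubes a (pvHiX cubes a) rest (pvRowsInv cubes order done)
        = pvRowsInv cubes order (done ++ [a]) := by
      -- rest is key-nondecreasing
      have hrest_pw : rest.Pairwise (fun x y => pvKey cubes x ≤ pvKey cubes y) := by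
        have := hdone ▸ hpw
        exact ((List.pairwise_append.mp this).2.1).tail
      have hnd' : (done ++ a :: rest).Nodup := hdone ▸ hnd
      have hanr : a ∉ rest := by
        have := (List.nodup_append.mp hnd').2.1
        exact (List.nodup_cons.mp this).1
      have hrest_nd : rest.Nodup := by
        have := (List.nodup_append.mp hnd').2.1
        exact (List.nodup_cons.mp this).2
      have hdis : ∀ x ∈ done, x ∉ a :: rest := by
        intro x hx
        exact fun hy => ((List.nodup_append.mp hnd').2.2 x hx x hy) rfl
      have hax : a ∈ order := by rw [← hdone]; exact List.mem_append_right _ List.mem_cons_self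
      have han : a < cubes.length := (hmem a).mp hax
      have hrn : ∀ b ∈ rest, b < cubes.length := by
        intro b hb
        exact (hmem b).mp (by rw [← hdone]; exact List.mem_append_right _ (List.mem_cons_of_mem _ hb))
      rw [pvScan_eq_foldl, pv_takeWhile_eq_filter cubes _ rest hrest_pw]
      set cs := rest.filter (fun b => decide (pvKey cubes b ≤ pvHiX cubes a)) with hcs
      have hcs_sub : ∀ b ∈ cs, b ∈ rest := fun b hb => List.mem_of_mem_filter hb
      have hlen_inv : (pvRowsInv cubes order done).length = cubes.length := by
        simp [pvRowsInv]
      apply List.ext_getElem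
      · rw [pv_length_foldl_upd, hlen_inv]
        simp [pvRowsInv]
      · intro i h1 h2
        have hin : i < cubes.length := by
          rw [pv_length_foldl_upd, hlen_inv] at h1
          exact h1
        have hgetD : ∀ (l : List (List Int)) (h : i < l.length), l[i] = l.getD i [] := by
          intro l h
          simp [List.getD_eq_getElem?_getD, List.getElem?_eq_getElem h]
        rw [hgetD _ h1, hgetD _ h2]
        rw [pv_foldl_upd_getD cubes a cs (pvRowsInv cubes order done)
              (hrest_nd.filter _) (fun h => hanr (hcs_sub a h)) (hlen_inv ▸ han)
              (fun b hb => hlen_inv ▸ hrn b (hcs_sub b hb)) i]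
        have hinv_getD : ∀ (dn : List Nat) (j : Nat), j < cubes.length →
            (pvRowsInv cubes order dn).getD j []
              = ((if j ∈ dn then order else dn).filter (pvPartnerT cubes j)).map (fun b => ((b : Nat) : Int)) := by
          intro dn j hj
          unfold pvRowsInv
          rw [List.getD_eq_getElem?_getD]
          rw [List.getElem?_map, List.getElem?_range hj]
          rfl
        have hand : a ∉ done := by
          intro hx
          exact hdis a hx List.mem_cons_self
        rw [hinv_getD (done ++ [a]) i hin]
        by_cases hia : i = a
        · subst hia
          rw [if_pos rfl, hinv_getD done i hin, if_neg hand,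
              if_pos (List.mem_append_right _ List.mem_cons_self)]
          rw [← hdone, List.filter_append, List.map_append]
          congr 1
          rw [List.filter_cons, if_neg (show ¬ pvPartnerT cubes i i = true from by simp [pvPartnerT])]
          -- cs.filter (T i ·) = rest.filter (partner i)
          rw [hcs, List.filter_filter]
          congr 1
          apply List.filter_congr
          intro b hb
          have hbi : b ≠ i := fun h => hanr (h ▸ hb)
          simp only [pvPartnerT, hbi, decide_true, Bool.true_and, ne_eq, not_false_eq_true]
          by_cases ht : pvT cubes i b = true
          · have := (Himp i b han (hrn b hb) ht).1
            simp [ht, this]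
          · simp only [Bool.not_eq_true] at ht
            simp [ht]
        · rw [if_neg hia]
          by_cases hid : i ∈ done
          · have hnotcs : ¬ (i ∈ cs ∧ pvT cubes i a = true) := fun h =>
              hdis i hid (List.mem_cons_of_mem _ (hcs_sub i h.1))
            rw [if_neg hnotcs, hinv_getD done i hin, if_pos hid,
                if_pos (List.mem_append_left _ hid)]
          · have hnotin : i ∉ done ++ [a] := by
              intro hx
              rcases List.mem_append.mp hx with h | h
              · exact hid h
              · exact hia (List.mem_singleton.mp h)
            have hir : i ∈ rest := by
              have : i ∈ order := (hmem i).mpr hin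
              rw [← hdone] at this
              rcases List.mem_append.mp this with h | h
              · exact absurd h hid
              · exact (List.mem_cons.mp h).resolve_left hia
            by_cases hT : pvT cubes i a = true
            · have hkey : pvKey cubes i ≤ pvHiX cubes a := (Himp i a hin han hT).2
              have hics : i ∈ cs := by
                rw [hcs, List.mem_filter]
                exact ⟨hir, by simpa using hkey⟩
              rw [if_pos (⟨hics, hT⟩ : i ∈ cs ∧ pvT cubes i a = true),
                  hinv_getD done i hin, if_neg hid, if_neg hnotin,
                  List.filter_append, List.map_append]
              congr 1
              rw [List.filter_cons,
                  if_pos (show pvPartnerT cubes i a = true from by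
                    unfold pvPartnerT
                    rw [hT, Bool.and_true]
                    exact decide_eq_true (Ne.symm hia))]
              rfl
            · have hno : ¬ (i ∈ cs ∧ pvT cubes i a = true) := by rintro ⟨_, h⟩; exact hT h
              rw [if_neg hno, hinv_getD done i hin, if_neg hid, if_neg hnotin,
                  List.filter_append, List.map_append]
              rw [List.filter_cons,
                  if_neg (show ¬ pvPartnerT cubes i a = true from by simp [pvPartnerT, hT])]
              simp
    rw [hstep]
    exact ih (done ++ [a]) (by rw [← hdone]; simp)

-- getD membership
lemma pv_getD_mem {α : Type} (l : List α) (i : Nat) (h : i < l.length) (d : α) :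
    l.getD i d ∈ l := by
  rw [List.getD_eq_getElem?_getD, List.getElem?_eq_getElem h]
  exact List.getElem_mem h

-- one step of B's test loop, with the condition as a proposition
lemma pvTouchLoop_cons (c d : List (List Int)) (k : Int) (rest : List Int) :
    pvTouchLoop c d (k :: rest)
      = if (PySem.List.pyGetD (PySem.List.pyGetD d 0 []) k 0 >
              PySem.List.pyGetD (PySem.List.pyGetD c 1 []) k 0 - (if k = 2 then 1 else 0) ∨
            PySem.List.pyGetD (PySem.List.pyGetD d 1 []) k 0 <
              PySem.List.pyGetD (PySem.List.pyGetD c 0 []) k 0 - (if k = 2 then 1 else 0))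
        then false else pvTouchLoop c d rest := by
  rw [pvTouchLoop]
  simp only [Bool.or_eq_true, decide_eq_true_eq, beq_iff_eq]

-- one step of A's collision loop, with the condition as a proposition
lemma pvCollisionLoop_cons (c1 c2 : List (List Int)) (k : Int) (rest : List Int) :
    pvCollisionLoop c1 c2 (k :: rest)
      = if (PySem.List.pyGetD (PySem.List.pyGetD c2 0 []) k 0 >
              PySem.List.pyGetD (PySem.List.pyGetD c1 1 []) k 0 ∨
            PySem.List.pyGetD (PySem.List.pyGetD c2 1 []) k 0 <
              PySem.List.pyGetD (PySem.List.pyGetD c1 0 []) k 0)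
        then false else pvCollisionLoop c1 c2 rest := by
  rw [pvCollisionLoop]
  simp only [Bool.or_eq_true, decide_eq_true_eq]

-- B's pair test reads cubes[x][0][0] / [1][0] when it passes the x axis
lemma pv_himp (cubes : List (List (List Int)))
    (hshape : ∀ c ∈ cubes, 2 ≤ c.length ∧ c.getD 0 [] ≠ [] ∧ c.getD 1 [] ≠ []) :
    ∀ x y : Nat, x < cubes.length → y < cubes.length → pvT cubes x y = true →
      pvKey cubes y ≤ pvHiX cubes x ∧ pvKey cubes x ≤ pvHiX cubes y := by
  intro x y hx hy hT
  have hcx := hshape (cubes.getD x []) (pv_getD_mem _ _ hx _)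
  have hdim : (0 : Int) < min ((PySem.List.pyGetD (cubes.getD x []) 0 []).length : Int) 3 := by
    rw [show PySem.List.pyGetD (cubes.getD x []) (0 : Int) [] = (cubes.getD x []).getD 0 []
        from by simp [PySem.List.pyGetD_ofNat']]
    have h1 : (cubes.getD x []).getD 0 [] ≠ [] := hcx.2.1
    have h2 : 0 < ((cubes.getD x []).getD 0 []).length := List.length_pos_iff.mpr h1
    omega
  unfold pvT pvTouch at hT
  rw [PySem.List.pyRange_one_cons hdim, pvTouchLoop_cons] at hT
  rw [if_neg (show ¬ ((0 : Int) = 2) from by norm_num)] at hT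
  split at hT
  · exact absurd hT (by simp)
  · rename_i hcond
    rw [not_or] at hcond
    obtain ⟨h1, h2⟩ := hcond
    unfold pvKey pvHiX
    omega

-- under Pre_ the two directed pair tests coincide
-- the two directed pair tests agree under Pre_ (within range both read the same shifted
-- values; Pre_ guarantees a disjoint axis is found before any read leaves the safe range)
lemma pv_loops_eq (c e : List (List Int)) (hc2 : 2 ≤ c.length) :
    ∀ ks : List Nat, ks.Pairwise (· < ·) →
      ((∀ k ∈ ks, k < min (c.getD 1 []).length 3) ∨
       (∃ k0 ∈ ks, k0 < min (c.getD 1 []).length 3 ∧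
         ((e.getD 0 []).getD k0 0 > (c.getD 1 []).getD k0 0 - (if k0 = 2 then 1 else 0) ∨
          (e.getD 1 []).getD k0 0 < (c.getD 0 []).getD k0 0 - (if k0 = 2 then 1 else 0)))) →
      (∀ k ∈ ks, k < min (c.getD 0 []).length 3) →
      pvCollisionLoop (pvShiftCoords c [0, 0, -1]) e (ks.map (fun k => ((k : Nat) : Int)))
        = pvTouchLoop c e (ks.map (fun k => ((k : Nat) : Int))) := by
  have hshift : ∀ b : Nat, b < c.length →
      (pvShiftCoords c [0, 0, -1]).getD b []
        = List.zipWith (fun a b => a + b) (c.getD b []) [0, 0, -1] := by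
    intro b hb
    exact pv_getD_map_of_lt _ _ _ hb _ []
  have hzip : ∀ (l : List Int) (k : Nat), k < min l.length 3 →
      (List.zipWith (fun a b => a + b) l [0, 0, -1]).getD k 0
        = l.getD k 0 - (if k = 2 then 1 else 0) := by
    intro l k hk
    have hk3 : k < 3 := by omega
    have hkl : k < l.length := by omega
    have hkz : k < (List.zipWith (fun a b => a + b) l [0, 0, -1]).length := by
      rw [List.length_zipWith]
      simp only [List.length_cons, List.length_nil]
      omega
    rw [List.getD_eq_getElem?_getD, List.getElem?_eq_getElem hkz, Option.getD_some,
        List.getElem_zipWith]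
    rw [List.getD_eq_getElem?_getD, List.getElem?_eq_getElem hkl, Option.getD_some]
    interval_cases k <;> simp <;> omega
  have hsh0 : PySem.List.pyGetD (pvShiftCoords c [0, 0, -1]) (0 : Int) []
      = List.zipWith (fun a b => a + b) (c.getD 0 []) [0, 0, -1] := by
    rw [show PySem.List.pyGetD (pvShiftCoords c [0, 0, -1]) (0 : Int) []
        = (pvShiftCoords c [0, 0, -1]).getD 0 [] from by simp [PySem.List.pyGetD_ofNat']]
    exact hshift 0 (by omega)
  have hsh1 : PySem.List.pyGetD (pvShiftCoords c [0, 0, -1]) (1 : Int) []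
      = List.zipWith (fun a b => a + b) (c.getD 1 []) [0, 0, -1] := by
    rw [show PySem.List.pyGetD (pvShiftCoords c [0, 0, -1]) (1 : Int) []
        = (pvShiftCoords c [0, 0, -1]).getD 1 [] from by simp [PySem.List.pyGetD_ofNat']]
    exact hshift 1 (by omega)
  intro ks
  induction ks with
  | nil => intro _ _ _; rfl
  | cons k ks ih =>
    intro hpw H Hdim
    have hk0 : k < min (c.getD 0 []).length 3 := Hdim k List.mem_cons_self
    have hsafe : k < min (c.getD 1 []).length 3 := by
      rcases H with h | ⟨k0, hk0m, hk0s, _⟩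
      · exact h k List.mem_cons_self
      · rcases List.mem_cons.mp hk0m with h | h
        · omega
        · have : k < k0 := (List.pairwise_cons.mp hpw).1 k0 h
          omega
    have hread0 : PySem.List.pyGetD (PySem.List.pyGetD (pvShiftCoords c [0, 0, -1]) 0 []) ((k : Nat) : Int) 0
        = (c.getD 0 []).getD k 0 - (if k = 2 then 1 else 0) := by
      rw [hsh0, PySem.List.pyGetD_natCast]
      exact hzip _ k hk0
    have hread1 : PySem.List.pyGetD (PySem.List.pyGetD (pvShiftCoords c [0, 0, -1]) 1 []) ((k : Nat) : Int) 0
        = (c.getD 1 []).getD k 0 - (if k = 2 then 1 else 0) := by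
      rw [hsh1, PySem.List.pyGetD_natCast]
      exact hzip _ k hsafe
    have hBread0 : PySem.List.pyGetD (PySem.List.pyGetD c 0 []) ((k : Nat) : Int) 0 = (c.getD 0 []).getD k 0 := by
      rw [show PySem.List.pyGetD c (0 : Int) [] = c.getD 0 [] from by simp [PySem.List.pyGetD_ofNat'],
          PySem.List.pyGetD_natCast]
    have hBread1 : PySem.List.pyGetD (PySem.List.pyGetD c 1 []) ((k : Nat) : Int) 0 = (c.getD 1 []).getD k 0 := by
      rw [show PySem.List.pyGetD c (1 : Int) [] = c.getD 1 [] from by simp [PySem.List.pyGetD_ofNat'],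
          PySem.List.pyGetD_natCast]
    have hEread0 : PySem.List.pyGetD (PySem.List.pyGetD e 0 []) ((k : Nat) : Int) 0 = (e.getD 0 []).getD k 0 := by
      rw [show PySem.List.pyGetD e (0 : Int) [] = e.getD 0 [] from by simp [PySem.List.pyGetD_ofNat'],
          PySem.List.pyGetD_natCast]
    have hEread1 : PySem.List.pyGetD (PySem.List.pyGetD e 1 []) ((k : Nat) : Int) 0 = (e.getD 1 []).getD k 0 := by
      rw [show PySem.List.pyGetD e (1 : Int) [] = e.getD 1 [] from by simp [PySem.List.pyGetD_ofNat'],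
          PySem.List.pyGetD_natCast]
    have hdropk : (if ((k : Nat) : Int) = 2 then (1 : Int) else 0) = (if k = 2 then (1 : Int) else 0) := by
      by_cases hk : k = 2
      · rw [if_pos (by exact_mod_cast hk), if_pos hk]
      · rw [if_neg (fun h => hk (by exact_mod_cast h)), if_neg hk]
    simp only [List.map_cons]
    rw [pvCollisionLoop_cons, pvTouchLoop_cons]
    rw [hread0, hread1, hBread0, hBread1, hEread0, hEread1, hdropk]
    by_cases hcond : ((e.getD 0 []).getD k 0 > (c.getD 1 []).getD k 0 - (if k = 2 then 1 else 0) ∨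
        (e.getD 1 []).getD k 0 < (c.getD 0 []).getD k 0 - (if k = 2 then 1 else 0))
    · rw [if_pos hcond, if_pos hcond]
    · rw [if_neg hcond, if_neg hcond]
      apply ih (List.pairwise_cons.mp hpw).2
      · rcases H with h | ⟨k0, hk0m, hk0s, hex⟩
        · exact Or.inl (fun x hx => h x (List.mem_cons_of_mem _ hx))
        · rcases List.mem_cons.mp hk0m with h | h
          · subst h
            exact absurd hex hcond
          · exact Or.inr ⟨k0, h, hk0s, hex⟩
      · exact fun x hx => Hdim x (List.mem_cons_of_mem _ hx)

lemma pvT_eq_pvP (cubes : List (List (List Int))) (hpre : Pre_make_restmap cubes)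
    (i j : Nat) (hi : i < cubes.length) (hj : j < cubes.length) (hij : i ≠ j) :
    pvT cubes i j = pvP cubes i j := by
  obtain ⟨hshape, hpair⟩ := hpre
  have hcx := hshape (cubes.getD i []) (pv_getD_mem _ _ hi _)
  have hc2 : 2 ≤ (cubes.getD i []).length := hcx.1
  have hdim_eq : (PySem.List.pyGetD (pvShiftCoords (cubes.getD i []) [0, 0, -1]) 0 []).length
      = min ((cubes.getD i []).getD 0 []).length 3 := by
    rw [show PySem.List.pyGetD (pvShiftCoords (cubes.getD i []) [0, 0, -1]) (0 : Int) []
        = (pvShiftCoords (cubes.getD i []) [0, 0, -1]).getD 0 []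
        from by simp [PySem.List.pyGetD_ofNat']]
    have h1 : (pvShiftCoords (cubes.getD i []) [0, 0, -1]).getD 0 []
        = List.zipWith (fun a b => a + b) ((cubes.getD i []).getD 0 []) [0, 0, -1] :=
      pv_getD_map_of_lt _ _ _ (show 0 < (cubes.getD i []).length from by omega) _ []
    rw [h1, List.length_zipWith]
    simp
  have hBdim : PySem.List.pyGetD (cubes.getD i []) (0 : Int) [] = (cubes.getD i []).getD 0 [] := by
    simp [PySem.List.pyGetD_ofNat']
  unfold pvT pvTouch pvP pvCollision
  rw [hdim_eq, hBdim]
  rw [show (min ((((cubes.getD i []).getD 0 []).length : Nat) : Int) 3)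
      = ((min ((cubes.getD i []).getD 0 []).length 3 : Nat) : Int) from by push_cast; rfl]
  rw [PySem.List.pyRange_zero_natCast]
  symm
  apply pv_loops_eq (cubes.getD i []) (cubes.getD j []) hc2 _ (List.pairwise_lt_range)
  · rcases hpair i hi j hj hij with h | ⟨k0, hk0, hex⟩
    · left
      intro k hk
      rw [List.mem_range] at hk
      unfold pvS at h
      omega
    · right
      refine ⟨k0, ?_, ?_, hex⟩
      · rw [List.mem_range]
        unfold pvS at hk0
        omega
      · unfold pvS at hk0
        omega
  · intro k hk
    rw [List.mem_range] at hk
    exact hk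

-- B equals the canonical result
lemma pvB_eq (cubes : List (List (List Int))) (hpre : Pre_make_restmap cubes) :
    make_restmap_alt cubes
      = (List.range cubes.length).map (fun i => ((i : Int), pvRow cubes i) : Nat → Int × List Int) := by
  unfold make_restmap_alt
  simp only []
  set n := cubes.length with hn
  set order := PySem.List.sorted (List.range n) (fun i => pvKey cubes i) false with horder
  have hperm : order.Perm (List.range n) := PySem.List.sorted_perm _ _ _
  have hpw : order.Pairwise (fun x y => pvKey cubes x ≤ pvKey cubes y) :=
    PySem.List.sorted_pairwise _ _
  have Himp := pv_himp cubes hpre.1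
  have hrows0 : (List.range n).map (fun _ => ([] : List Int)) = pvRowsInv cubes order [] := by
    unfold pvRowsInv
    apply List.map_congr_left
    intro i _
    simp
  rw [hrows0]
  rw [pv_sweep_inv cubes order hperm hpw Himp order [] rfl]
  -- assemble the dict
  set rows := pvRowsInv cubes order order with hrows
  have hkeys : (((PySem.List.enumerate rows).map
      (fun p => (p.1, PySem.List.sorted p.2 (fun x => x) false))).map (fun p => p.1)).Nodup := by
    rw [List.map_map]
    rw [show ((fun p : Int × List Int => p.1) ∘
          (fun p : Int × List Int => (p.1, PySem.List.sorted p.2 (fun x => x) false)))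
        = fun p : Int × List Int => p.1 from rfl]
    rw [PySem.List.map_fst_enumerate]
    exact PySem.List.nodup_pyRange_one _ _
  show (PySem.Dict.empty.update ((PySem.List.enumerate rows).map
      (fun p => (p.1, PySem.List.sorted p.2 (fun x => x) false)))).items = _
  unfold PySem.Dict.update
  refine Eq.trans (PySem.Dict.items_foldl_insert_fresh
      ((PySem.List.enumerate rows).map (fun p => (p.1, PySem.List.sorted p.2 (fun x => x) false)))
      (fun p => p.1) (fun p => p.2) PySem.Dict.empty
      (by intro a _; exact PySem.Dict.contains_empty _) hkeys) ?_
  rw [show (PySem.Dict.empty : PySem.Dict Int (List Int)).items = [] from rfl, List.nil_append]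
  rw [List.map_map]
  rw [show ((fun p : Int × List Int => (p.1, p.2)) ∘
        (fun p : Int × List Int => (p.1, PySem.List.sorted p.2 (fun x => x) false)))
      = fun p : Int × List Int => (p.1, PySem.List.sorted p.2 (fun x => x) false) from rfl]
  rw [PySem.List.enumerate_eq_map_pyRange rows []]
  have hlrows : rows.length = n := by
    rw [hrows]
    unfold pvRowsInv
    rw [List.length_map, List.length_range, hn]
  rw [show PySem.List.len rows = ((n : Int)) by simp [PySem.List.len, hlrows]]
  rw [PySem.List.pyRange_zero_natCast]
  simp only [List.map_map]
  apply List.map_congr_left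
  intro i hi
  rw [List.mem_range] at hi
  simp only [Function.comp, PySem.List.pyGetD_natCast]
  have hrowi : rows.getD i [] = ((order.filter (pvPartnerT cubes i)).map (fun j => ((j : Nat) : Int))) := by
    rw [hrows]
    unfold pvRowsInv
    rw [List.getD_eq_getElem?_getD, List.getElem?_map, List.getElem?_range hi]
    simp only [Option.map_some, Option.getD_some]
    rw [if_pos (hperm.mem_iff.mpr (List.mem_range.mpr hi))]
  rw [hrowi]
  simp only [Prod.mk.injEq, true_and]
  -- sorted row = partners in index order
  have hfilters : ∀ j ∈ List.range cubes.length, pvPartnerT cubes i j = pvPartner cubes i j := by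
    intro j hj
    rw [List.mem_range] at hj
    by_cases hij : j = i
    · subst hij; simp [pvPartnerT, pvPartner]
    · unfold pvPartnerT pvPartner
      rw [pvT_eq_pvP cubes hpre i j hi hj (Ne.symm hij)]
  apply PySem.List.sorted_eq_of_perm_of_pairwise_lt
  · apply List.Perm.map
    have h1 : List.filter (pvPartner cubes i) (List.range cubes.length)
        = List.filter (pvPartnerT cubes i) (List.range cubes.length) :=
      List.filter_congr (fun j hj => (hfilters j hj).symm)
    rw [h1]
    exact (hperm.filter _).symm
  · unfold pvRow
    exact List.Pairwise.map _ (fun a b h => by exact_mod_cast h)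
      (List.Pairwise.filter _ List.pairwise_lt_range)

-- ===== VERDICT (by name: the statement is the Claim_ definition above) =====
theorem make_restmap_spec : Claim_equal_make_restmap := by
  intro cubes _ hpre
  show make_restmap cubes = make_restmap_alt cubes
  rw [pvA_eq cubes, pvB_eq cubes hpre]
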